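-- pv_equiv track=rewrite | github.com/dynamiq-ai/dynamiq | dynamiq/skills/utils.py | extract_skill_content_slice
-- ===== SOURCE A (Python) =====
-- def extract_skill_content_slice(
--     instructions: str,
--     section: str | None = None,
--     line_start: int | None = None,
--     line_end: int | None = None,
-- ) -> tuple[str, str | None]:
--     """Extract a slice of skill instructions by section header or line range.
--
--     Args:
--         instructions: Full skill instructions (e.g. from SkillInstructions.instructions).
--         section: Markdown header to extract (e.g. "Welcome messages"); first # or ## match.
--         line_start: 1-based start line (inclusive).
--         line_end: 1-based end line (inclusive).
--
--     Returns:
--         Tuple of (sliced_instructions, section_used). section_used is the section name if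
--         section was requested and found, else None.
--     """
--     lines = instructions.splitlines()
--     section_used: str | None = None
--
--     if section:
--         section_lower = section.strip().lower()
--         start_i: int | None = None
--         end_i = len(lines)
--         for i, line in enumerate(lines):
--             s = line.strip()
--             if s.startswith("#"):
--                 header_level = len(s) - len(s.lstrip("#"))
--                 header_text = s.lstrip("#").strip().lower()
--                 if header_text == section_lower:
--                     start_i = i
--                     for j in range(i + 1, len(lines)):
--                         next_line = lines[j].strip()
--                         if next_line.startswith("#"):
--                             next_level = len(next_line) - len(next_line.lstrip("#"))
--                             if next_level <= header_level:
--                                 end_i = j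
--                                 break
--                     section_used = section
--                     break
--         if start_i is not None:
--             instructions = "\n".join(lines[start_i:end_i])
--         else:
--             instructions = ""
--             section_used = None
--     elif line_start is not None or line_end is not None:
--         start = max(0, (line_start or 1) - 1)
--         end = line_end if line_end is not None else len(lines)
--         end = min(end, len(lines))
--         instructions = "\n".join(lines[start:end])
--
--     return instructions, section_used
-- ===== SOURCE B (Python) =====
-- def extract_skill_content_slice(
--     instructions,
--     section=None,
--     line_start=None,
--     line_end=None,
-- ):
--     """Slice skill instructions by markdown section header or 1-based line range."""
--     lines = instructions.splitlines()
--
--     if section: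
--         target = section.strip().lower()
--         # One pass: collect all headers as (index, level, text).
--         headers = []
--         for i, line in enumerate(lines):
--             s = line.strip()
--             if s.startswith("#"):
--                 stripped = s.lstrip("#")
--                 headers.append((i, len(s) - len(stripped), stripped.strip().lower()))
--         # Look the section up in the header table, then walk the table for its end.
--         for k, (i, lvl, text) in enumerate(headers):
--             if text == target:
--                 end_i = len(lines)
--                 for j, jl, _ in headers[k + 1:]:
--                     if jl <= lvl:
--                         end_i = j
--                         break
--                 return "\n".join(lines[i:end_i]), section
--         return "", None
--
--     if line_start is not None or line_end is not None:
--         start = max(0, (line_start or 1) - 1)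
--         end = line_end if line_end is not None else len(lines)
--         end = min(end, len(lines))
--         return "\n".join(lines[start:end]), None
--
--     return instructions, None
-- ===== Notes on version B (the rewrite author's own statement) =====
-- stated objective: alternative
-- what changed: B builds a header table (index, level, text) in one pass and resolves the section start and end by scanning that table, instead of A's rescan of the raw lines from the match point onward; the line-range and pass-through branches are unchanged.
import Mathlib
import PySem

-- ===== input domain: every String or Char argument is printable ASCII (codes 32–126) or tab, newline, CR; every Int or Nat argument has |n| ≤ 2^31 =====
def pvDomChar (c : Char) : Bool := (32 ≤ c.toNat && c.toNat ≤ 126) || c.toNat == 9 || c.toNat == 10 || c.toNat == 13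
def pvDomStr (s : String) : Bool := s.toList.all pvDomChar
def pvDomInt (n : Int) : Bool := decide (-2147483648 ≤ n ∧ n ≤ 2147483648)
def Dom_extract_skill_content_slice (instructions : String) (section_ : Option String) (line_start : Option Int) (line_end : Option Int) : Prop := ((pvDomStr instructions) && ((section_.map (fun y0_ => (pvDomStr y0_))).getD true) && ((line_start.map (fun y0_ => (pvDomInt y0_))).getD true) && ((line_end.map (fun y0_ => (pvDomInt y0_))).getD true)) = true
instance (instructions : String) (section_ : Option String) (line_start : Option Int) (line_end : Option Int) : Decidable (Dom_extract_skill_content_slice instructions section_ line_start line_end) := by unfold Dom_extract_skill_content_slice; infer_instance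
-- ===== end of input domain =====

-- B resolves the section by a precomputed header table instead of A's rescan of the raw
-- lines; same results everywhere (objective: alternative decomposition).

-- shared expression helpers (identical source expressions in both Pythons):
-- s.lstrip("#") — exact: drops exactly the leading '#' characters
def pvLstripHash (cs : List Char) : List Char := cs.dropWhile (· == '#')
-- len(s) - len(s.lstrip("#"))
def pvHeaderLevel (s : String) : Int := PySem.Str.len s - ((pvLstripHash s.toList).length : Int)
-- s.lstrip("#").strip().lower()
def pvHeaderText (s : String) : List Char := PySem.Chars.lower (PySem.Chars.strip (pvLstripHash s.toList))

-- ===== PORT A =====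
-- inner 'for j in range(i+1, len(lines))' scan for the closing header
def pvAEnd (hl : Int) (rest : List String) (j : Nat) (dflt : Nat) : Nat :=
  match rest with
  | [] => dflt
  | l :: t =>
    let nl := PySem.Str.strip l
    if PySem.Str.startswith nl "#" then
      if pvHeaderLevel nl ≤ hl then j else pvAEnd hl t (j+1) dflt
    else pvAEnd hl t (j+1) dflt

-- outer 'for i, line in enumerate(lines)' scan for the matching header
def pvAFind (target : List Char) (total : Nat) (rest : List String) (i : Nat) : Option (Nat × Nat) :=
  match rest with
  | [] => none
  | l :: t =>
    let s := PySem.Str.strip l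
    if PySem.Str.startswith s "#" then
      if pvHeaderText s = target then some (i, pvAEnd (pvHeaderLevel s) t (i+1) total)
      else pvAFind target total t (i+1)
    else pvAFind target total t (i+1)

-- the elif line-range branch (A)
def pvARange (lines : List String) (instructions : String) (line_start line_end : Option Int) : String × Option String :=
  match line_start, line_end with
  | none, none => (instructions, none)
  | _, _ =>
    let start : Int := max 0 ((match line_start with | none => 1 | some v => if v = 0 then 1 else v) - 1)
    let end_ : Int := min (match line_end with | none => (lines.length : Int) | some v => v) (lines.length : Int)
    (PySem.Str.join "\n" (PySem.List.slice lines (some start) (some end_)), none)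

def extract_skill_content_slice (instructions : String) (section_ : Option String) (line_start : Option Int) (line_end : Option Int) : String × Option String :=
  let lines := PySem.Str.splitlines instructions
  match section_ with
  | some sec =>
    if sec ≠ "" then
      match pvAFind (PySem.Chars.lower (PySem.Chars.strip sec.toList)) lines.length lines 0 with
      | some (st, en) => (PySem.Str.join "\n" (PySem.List.slice lines (some (st : Int)) (some (en : Int))), some sec)
      | none => ("", none)
    else pvARange lines instructions line_start line_end
  | none => pvARange lines instructions line_start line_end

-- ===== PORT B =====
-- one pass building the header table (index, level, text)
def pvHeaders (rest : List String) (i : Nat) : List (Nat × Int × List Char) :=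
  match rest with
  | [] => []
  | l :: t =>
    let s := PySem.Str.strip l
    if PySem.Str.startswith s "#" then
      (i, pvHeaderLevel s, pvHeaderText s) :: pvHeaders t (i+1)
    else pvHeaders t (i+1)

-- walk the header table for the first later header of level <= lvl
def pvBEnd (lvl : Int) (hs : List (Nat × Int × List Char)) (total : Nat) : Nat :=
  match hs with
  | [] => total
  | (j, jl, _) :: t => if jl ≤ lvl then j else pvBEnd lvl t total

-- look the target up in the header table
def pvBFind (target : List Char) (hs : List (Nat × Int × List Char)) (total : Nat) : Option (Nat × Nat) :=
  match hs with
  | [] => none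
  | (i, lvl, txt) :: t =>
    if txt = target then some (i, pvBEnd lvl t total) else pvBFind target t total

-- the line-range branch (B; same source text as A's)
def pvBRange (lines : List String) (instructions : String) (line_start line_end : Option Int) : String × Option String :=
  match line_start, line_end with
  | none, none => (instructions, none)
  | _, _ =>
    let start : Int := max 0 ((match line_start with | none => 1 | some v => if v = 0 then 1 else v) - 1)
    let end_ : Int := min (match line_end with | none => (lines.length : Int) | some v => v) (lines.length : Int)
    (PySem.Str.join "\n" (PySem.List.slice lines (some start) (some end_)), none)

def extract_skill_content_slice_alt (instructions : String) (section_ : Option String) (line_start : Option Int) (line_end : Option Int) : String × Option String :=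
  let lines := PySem.Str.splitlines instructions
  match section_ with
  | some sec =>
    if sec ≠ "" then
      match pvBFind (PySem.Chars.lower (PySem.Chars.strip sec.toList)) (pvHeaders lines 0) lines.length with
      | some (st, en) => (PySem.Str.join "\n" (PySem.List.slice lines (some (st : Int)) (some (en : Int))), some sec)
      | none => ("", none)
    else pvBRange lines instructions line_start line_end
  | none => pvBRange lines instructions line_start line_end

-- ===== PRECONDITION & SPEC =====
def Spec_extract_skill_content_slice (instructions : String) (section_ : Option String) (line_start : Option Int) (line_end : Option Int) (out : String × Option String) : Prop := out = extract_skill_content_slice_alt instructions section_ line_start line_end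
instance (instructions : String) (section_ : Option String) (line_start : Option Int) (line_end : Option Int) (out : String × Option String) : Decidable (Spec_extract_skill_content_slice instructions section_ line_start line_end out) := by unfold Spec_extract_skill_content_slice; infer_instance

-- ===== CLAIM (what is proved, stated in full; the proofs are below) =====
def Claim_equal_extract_skill_content_slice : Prop := ∀ (instructions : String) (section_ : Option String) (line_start : Option Int) (line_end : Option Int), Dom_extract_skill_content_slice instructions section_ line_start line_end → Spec_extract_skill_content_slice instructions section_ line_start line_end (extract_skill_content_slice instructions section_ line_start line_end)

-- ===== LEMMAS AND PROOFS =====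

theorem pvEnd_eq (hl : Int) (t : List String) (j dflt : Nat) :
    pvAEnd hl t j dflt = pvBEnd hl (pvHeaders t j) dflt := by
  induction t generalizing j with
  | nil => simp [pvAEnd, pvHeaders, pvBEnd]
  | cons l t ih =>
    simp only [pvAEnd, pvHeaders]
    split_ifs <;> simp [pvBEnd, *]

theorem pvFind_eq (target : List Char) (total : Nat) (t : List String) (i : Nat) :
    pvAFind target total t i = pvBFind target (pvHeaders t i) total := by
  induction t generalizing i with
  | nil => simp [pvAFind, pvHeaders, pvBFind]
  | cons l t ih =>
    simp only [pvAFind, pvHeaders]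
    split_ifs <;> simp [pvBFind, *, pvEnd_eq]

theorem pvRange_eq (lines : List String) (instructions : String) (ls le : Option Int) :
    pvARange lines instructions ls le = pvBRange lines instructions ls le := rfl

-- ===== VERDICT (by name: the statement is the Claim_ definition above) =====
theorem extract_skill_content_slice_spec : Claim_equal_extract_skill_content_slice := by
  intro instructions section_ line_start line_end _
  unfold Spec_extract_skill_content_slice extract_skill_content_slice extract_skill_content_slice_alt
  cases section_ with
  | none => exact pvRange_eq ..
  | some sec =>
    by_cases h : sec ≠ "" <;> simp [h, pvFind_eq, pvRange_eq]
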